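-- pv_equiv track=rewrite | github.com/primatelabs/voodoopad-tools | tokenizer.py | is_wikiword
-- ===== SOURCE A (Python) =====
-- def is_wikiword(word):
--
--     # Must be alphanumeric
--     if not word.isalnum():
--         return False
--
--     # Must start with upper-case character
--     if not word[0].isupper():
--         return False
--
--     # Must contain at least 1 lower-case chacter followed
--     # by at least 1 upper-case character
--     has_lower = False
--     for i in range(1, len(word)):
--
--         if word[i].islower():
--             has_lower = True
--
--         if word[i].isupper() and has_lower:
--             return True
--
--     return False
-- ===== SOURCE B (Python) =====
-- def is_wikiword(word):
--
--     # Must be alphanumeric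
--     if not word.isalnum():
--         return False
--
--     # Must start with upper-case character
--     if not word[0].isupper():
--         return False
--
--     # First lower-case index and last upper-case index over positions 1..n-1:
--     # WikiWord iff some upper-case character comes after some lower-case one.
--     n = len(word)
--     first_lower = next((i for i in range(1, n) if word[i].islower()), None)
--     last_upper = next((i for i in range(n - 1, 0, -1) if word[i].isupper()), None)
--     return first_lower is not None and last_upper is not None and last_upper > first_lower
-- ===== Notes on version B (the rewrite author's own statement) =====
-- stated objective: alternative
-- what changed: A's early-exit scan carrying a has_lower flag is replaced by computing the first lower-case index and the last upper-case index over positions 1..n-1 and comparing them once.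
import Mathlib
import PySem

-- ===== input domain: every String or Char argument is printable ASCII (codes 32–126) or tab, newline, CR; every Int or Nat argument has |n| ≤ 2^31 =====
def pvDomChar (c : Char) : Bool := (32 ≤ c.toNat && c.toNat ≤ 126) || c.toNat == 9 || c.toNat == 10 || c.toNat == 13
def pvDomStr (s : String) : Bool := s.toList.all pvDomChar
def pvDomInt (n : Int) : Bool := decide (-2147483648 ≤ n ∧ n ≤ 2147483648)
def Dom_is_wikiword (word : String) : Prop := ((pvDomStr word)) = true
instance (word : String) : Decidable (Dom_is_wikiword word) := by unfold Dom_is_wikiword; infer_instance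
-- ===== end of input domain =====

-- B replaces A's early-exit has_lower flag scan by first-lowercase / last-uppercase
-- index extrema and one comparison (objective: alternative decomposition, same cost).

-- ===== PORT A =====
-- the 'for i in range(1, len(word))' loop with the has_lower flag
def isWikiLoopA : List Char → Bool → Bool
  | [], _ => false
  | c :: rest, hasLower =>
    let hasLower' := hasLower || PySem.Chars.islower c
    if PySem.Chars.isupper c && hasLower' then true
    else isWikiLoopA rest hasLower'

def is_wikiword (word : String) : Bool :=
  if PySem.Str.strIsalnum word = false then false
  else
    match PySem.Str.pyGet? word 0 with
    | none => false  -- word[0] IndexError is unreachable: "".isalnum() is False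
    | some c0 =>
      if PySem.Chars.isupper c0 = false then false
      else isWikiLoopA (word.toList.drop 1) false

-- ===== PORT B =====
def is_wikiword_alt (word : String) : Bool :=
  if PySem.Str.strIsalnum word = false then false
  else
    match PySem.Str.pyGet? word 0 with
    | none => false  -- unreachable, as in A
    | some c0 =>
      if PySem.Chars.isupper c0 = false then false
      else
        -- positions 1..n-1 of word = indices 0.. of the tail
        let tail := word.toList.drop 1
        -- first_lower = next((i for i in range(1, n) if word[i].islower()), None)
        -- last_upper = next((i for i in range(n-1, 0, -1) if word[i].isupper()), None)
        match tail.findIdx? PySem.Chars.islower, tail.reverse.findIdx? PySem.Chars.isupper with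
        | some fl, some ju => decide (tail.length - 1 - ju > fl)
        | _, _ => false

-- ===== PRECONDITION & SPEC =====
def Spec_is_wikiword (word : String) (out : Bool) : Prop := out = is_wikiword_alt word
instance (word : String) (out : Bool) : Decidable (Spec_is_wikiword word out) := by unfold Spec_is_wikiword; infer_instance

-- ===== CLAIM (what is proved, stated in full; the proofs are below) =====
def Claim_equal_is_wikiword : Prop := ∀ (word : String), Dom_is_wikiword word → Spec_is_wikiword word (is_wikiword word)

-- ===== LEMMAS AND PROOFS =====

-- a lower-case char followed (strictly later) by an upper-case char
def HasLowUp (cs : List Char) : Prop :=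
  ∃ i j, ∃ (hj : j < cs.length) (hij : i < j),
    PySem.Chars.islower (cs[i]'(lt_trans hij hj)) = true ∧ PySem.Chars.isupper cs[j] = true

-- structural-recursion form of the same condition
def goodB : List Char → Bool
  | [] => false
  | c :: rest => (PySem.Chars.islower c && rest.any PySem.Chars.isupper) || goodB rest

theorem lower_upper_disjoint (c : Char) :
    ¬(PySem.Chars.islower c = true ∧ PySem.Chars.isupper c = true) := by
  simp only [PySem.Chars.islower, PySem.Chars.isupper, Bool.and_eq_true, decide_eq_true_eq,
    Char.le_def, UInt32.le_iff_toNat_le]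
  rintro ⟨⟨h1, h2⟩, h3, h4⟩
  simp at h1 h2 h3 h4
  omega

theorem loopA_eq (cs : List Char) : ∀ b : Bool,
    isWikiLoopA cs b = ((b && cs.any PySem.Chars.isupper) || goodB cs) := by
  induction cs with
  | nil => intro b; simp [isWikiLoopA, goodB]
  | cons c rest ih =>
    intro b
    simp only [isWikiLoopA, goodB, List.any_cons]
    by_cases hu : PySem.Chars.isupper c = true
    · by_cases hl : PySem.Chars.islower c = true
      · exact absurd ⟨hl, hu⟩ (lower_upper_disjoint c)
      · simp only [hu, Bool.eq_false_iff.2 hl, ih]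
        cases b <;> simp
    · simp only [Bool.eq_false_iff.2 hu, ih]
      rw [Bool.eq_iff_iff]
      cases b <;> cases hl : PySem.Chars.islower c <;> simp

theorem goodB_iff (cs : List Char) : goodB cs = true ↔ HasLowUp cs := by
  induction cs with
  | nil => simp [goodB, HasLowUp]
  | cons c rest ih =>
    simp only [goodB, Bool.or_eq_true, Bool.and_eq_true, List.any_eq_true, ih]
    constructor
    · rintro (⟨hl, u, hu, hup⟩ | ⟨i, j, hj, hij, hlo, hup⟩)
      · obtain ⟨k, hk, hk'⟩ := List.mem_iff_getElem.1 hu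
        exact ⟨0, k + 1, by simpa using hk, Nat.succ_pos k, by simpa using hl, by simpa [hk']⟩
      · exact ⟨i + 1, j + 1, by simpa using hj, by omega, by simpa using hlo, by simpa using hup⟩
    · rintro ⟨i, j, hj, hij, hlo, hup⟩
      cases i with
      | zero =>
        left
        refine ⟨by simpa using hlo, rest[j - 1]'(by simp at hj; omega), List.getElem_mem _, ?_⟩
        have : (c :: rest)[j] = rest[j - 1]'(by simp at hj; omega) := by
          cases j with
          | zero => omega
          | succ j' => simp
        rw [this] at hup; exact hup
      | succ i' =>
        right
        cases j with
        | zero => omega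
        | succ j' =>
          exact ⟨i', j', by simpa using hj, by omega, by simpa using hlo, by simpa using hup⟩

-- B's extrema comparison also decides HasLowUp
theorem bcore_iff (cs : List Char) :
    (match cs.findIdx? PySem.Chars.islower, cs.reverse.findIdx? PySem.Chars.isupper with
     | some fl, some ju => decide (cs.length - 1 - ju > fl)
     | _, _ => false) = true ↔ HasLowUp cs := by
  cases hfl : cs.findIdx? PySem.Chars.islower with
  | none =>
    rw [List.findIdx?_eq_none_iff] at hfl
    simp only [HasLowUp]
    constructor
    · intro h; exact absurd h (by simp)
    · rintro ⟨i, j, hj, hij, hlo, _⟩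
      have := hfl (cs[i]'(lt_trans hij hj)) (List.getElem_mem _)
      simp [this] at hlo
  | some fl =>
    cases hju : cs.reverse.findIdx? PySem.Chars.isupper with
    | none =>
      rw [List.findIdx?_eq_none_iff] at hju
      simp only [HasLowUp]
      constructor
      · intro h; exact absurd h (by simp)
      · rintro ⟨i, j, hj, hij, _, hup⟩
        have := hju cs[j] (by rw [List.mem_reverse]; exact List.getElem_mem hj)
        simp [this] at hup
    | some ju =>
      obtain ⟨hfl_lt, hfl_p, hfl_min⟩ := List.findIdx?_eq_some_iff_getElem.1 hfl
      obtain ⟨hju_lt, hju_p, hju_min⟩ := List.findIdx?_eq_some_iff_getElem.1 hju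
      have hjlen : ju < cs.length := by simpa using hju_lt
      rw [List.getElem_reverse] at hju_p
      simp only [decide_eq_true_eq]
      constructor
      · intro hgt
        exact ⟨fl, cs.length - 1 - ju, by omega, hgt, by
          have : ∀ (h : fl < cs.length), PySem.Chars.islower cs[fl] = true := fun _ => hfl_p
          exact this _, hju_p⟩
      · rintro ⟨i, j, hj, hij, hlo, hup⟩
        -- fl ≤ i (fl is the first lower index)
        have h1 : fl ≤ i := by
          by_contra h
          exact hfl_min i (by omega) hlo
        -- j ≤ cs.length - 1 - ju (ju is the first upper index from the back)
        have h2 : j ≤ cs.length - 1 - ju := by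
          by_contra h
          have hrev : cs.length - 1 - j < ju := by omega
          refine hju_min (cs.length - 1 - j) hrev ?_
          rw [List.getElem_reverse]
          have : cs.length - 1 - (cs.length - 1 - j) = j := by omega
          simp_rw [this]; exact hup
        omega

-- ===== VERDICT (by name: the statement is the Claim_ definition above) =====
theorem loop_eq_extrema (cs : List Char) : isWikiLoopA cs false =
    (match cs.findIdx? PySem.Chars.islower, cs.reverse.findIdx? PySem.Chars.isupper with
     | some fl, some ju => decide (cs.length - 1 - ju > fl)
     | _, _ => false) := by
  rw [loopA_eq]
  simp only [Bool.false_and, Bool.false_or]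
  rw [Bool.eq_iff_iff, goodB_iff, ← bcore_iff]

theorem is_wikiword_spec : Claim_equal_is_wikiword := by
  intro word _
  unfold Spec_is_wikiword is_wikiword is_wikiword_alt
  by_cases ha : PySem.Str.strIsalnum word = false
  · rw [if_pos ha, if_pos ha]
  · rw [if_neg ha, if_neg ha]
    cases h0 : PySem.Str.pyGet? word 0 with
    | none => rfl
    | some c0 =>
      simp only [h0]
      by_cases hu : PySem.Chars.isupper c0 = false
      · rw [if_pos hu, if_pos hu]
      · rw [if_neg hu, if_neg hu]
        exact loop_eq_extrema _
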